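-- pv_equiv track=rewrite | github.com/killown/waypanel | src/plugins/experimental/network_manager/_network_cli_backend.py | parse_nmcli_output
-- ===== SOURCE A (Python) =====
-- from typing import Optional, Dict, Any, List, Tuple
--
-- NmcliDeviceDict = Dict[str, str]
--
-- def parse_nmcli_output(raw_output: str) -> List[NmcliDeviceDict]:
--     """
--     Parses raw 'nmcli device show' output into a list of device dictionaries.
--     The nmcli output is block-based, with each block representing a device,
--     separated by empty lines. Each line is a key:value pair.
--     Args:
--         raw_output: The raw string output from the 'nmcli device show' command.
--     Returns:
--         A list of dictionaries, where each dictionary represents a network device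
--         and its properties (e.g., {'GENERAL.DEVICE': 'wlan0', 'GENERAL.TYPE': 'wifi', ...}).
--         The loopback device ('lo') is explicitly excluded for typical use cases.
--     Raises:
--         None
--     """
--     devices: List[NmcliDeviceDict] = []
--     current_device: NmcliDeviceDict = {}
--     lines: List[str] = raw_output.strip().splitlines()
--     for line in lines:
--         line = line.strip()
--         if not line:
--             if current_device:
--                 if current_device.get("GENERAL.DEVICE") != "lo":
--                     devices.append(current_device)
--                 current_device = {}
--             continue
--         if ":" in line:
--             key: str
--             value: str
--             key, value = line.split(":", 1)
--             current_device[key.strip()] = value.strip()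
--     if current_device:
--         if current_device.get("GENERAL.DEVICE") != "lo":
--             devices.append(current_device)
--     return devices
-- ===== SOURCE B (Python) =====
-- from typing import Dict, List
--
-- NmcliDeviceDict = Dict[str, str]
--
-- def parse_nmcli_output(raw_output: str) -> List[NmcliDeviceDict]:
--     # Pipeline: partition stripped lines into blocks, build one dict per block, filter.
--     lines = [line.strip() for line in raw_output.strip().splitlines()]
--     blocks: List[List[str]] = []
--     current: List[str] = []
--     for line in lines:
--         if line:
--             current.append(line)
--         else:
--             blocks.append(current)
--             current = []
--     blocks.append(current)
--
--     def build(block: List[str]) -> NmcliDeviceDict: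
--         device: NmcliDeviceDict = {}
--         for line in block:
--             if ":" in line:
--                 key, value = line.split(":", 1)
--                 device[key.strip()] = value.strip()
--         return device
--
--     dicts = [build(block) for block in blocks]
--     return [d for d in dicts if d and d.get("GENERAL.DEVICE") != "lo"]
-- ===== Notes on version B (the rewrite author's own statement) =====
-- stated objective: simpler
-- what changed: Replaces A's single incremental flush-on-blank loop with a three-stage pipeline: partition stripped lines into blocks, build a dict per block, then filter out empty dicts and the loopback device.
import Mathlib
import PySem

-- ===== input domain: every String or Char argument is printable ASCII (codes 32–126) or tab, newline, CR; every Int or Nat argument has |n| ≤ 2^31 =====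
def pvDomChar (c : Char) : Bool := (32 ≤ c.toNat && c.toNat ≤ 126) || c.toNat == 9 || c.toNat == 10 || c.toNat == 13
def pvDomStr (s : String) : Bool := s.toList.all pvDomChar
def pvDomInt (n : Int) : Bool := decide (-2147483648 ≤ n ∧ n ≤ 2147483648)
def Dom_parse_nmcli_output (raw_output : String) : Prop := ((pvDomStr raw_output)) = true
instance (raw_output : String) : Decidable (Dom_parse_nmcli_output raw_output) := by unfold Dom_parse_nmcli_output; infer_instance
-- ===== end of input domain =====

-- B replaces A's incremental flush-on-blank loop by a partition-into-blocks / build / filter pipeline (simpler decomposition, same cost).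

-- ===== PORT A =====
-- A's loop state: (devices so far, current device dict); flush on blank stripped line and at the end.
def parse_nmcli_output (raw_output : String) : List (List (String × String)) :=
  let lines := PySem.Str.splitlines (PySem.Str.strip raw_output)
  let st :=
    lines.foldl
      (fun (st : List (PySem.Dict String String) × PySem.Dict String String) (line0 : String) =>
        let line := PySem.Str.strip line0
        if line = "" then
          if st.2.size ≠ 0 then
            (if st.2.get? "GENERAL.DEVICE" ≠ some "lo" then st.1 ++ [st.2] else st.1,
             PySem.Dict.empty)
          else st
        else if PySem.Str.isIn ":" line then
          -- ":" in line, so split(":", 1) yields exactly two parts; defaults are unreachable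
          let parts := (PySem.Str.splitMax? line ":" 1).getD []
          (st.1, st.2.insert (PySem.Str.strip (parts.headD ""))
                             (PySem.Str.strip ((parts.drop 1).headD "")))
        else st)
      ([], PySem.Dict.empty)
  let devices :=
    if st.2.size ≠ 0 then
      if st.2.get? "GENERAL.DEVICE" ≠ some "lo" then st.1 ++ [st.2] else st.1
    else st.1
  devices.map (·.items)

-- ===== PORT B =====
-- build one dict from the key:value lines of one block
def pvBuildBlock (block : List String) : PySem.Dict String String :=
  block.foldl
    (fun (device : PySem.Dict String String) (line : String) =>
      if PySem.Str.isIn ":" line then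
        -- ":" in line, so split(":", 1) yields exactly two parts; defaults are unreachable
        let parts := (PySem.Str.splitMax? line ":" 1).getD []
        device.insert (PySem.Str.strip (parts.headD ""))
                      (PySem.Str.strip ((parts.drop 1).headD ""))
      else device)
    PySem.Dict.empty

def parse_nmcli_output_alt (raw_output : String) : List (List (String × String)) :=
  let lines := (PySem.Str.splitlines (PySem.Str.strip raw_output)).map PySem.Str.strip
  let st :=
    lines.foldl
      (fun (st : List (List String) × List String) (line : String) =>
        if line ≠ "" then (st.1, st.2 ++ [line]) else (st.1 ++ [st.2], []))
      ([], [])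
  let blocks := st.1 ++ [st.2]
  let dicts := blocks.map pvBuildBlock
  (dicts.filter
      (fun d => d.size ≠ 0 ∧ d.get? "GENERAL.DEVICE" ≠ some "lo")).map (·.items)

-- ===== PRECONDITION & SPEC =====
def Spec_parse_nmcli_output (raw_output : String) (out : List (List (String × String))) : Prop := out = parse_nmcli_output_alt raw_output
instance (raw_output : String) (out : List (List (String × String))) : Decidable (Spec_parse_nmcli_output raw_output out) := by unfold Spec_parse_nmcli_output; infer_instance

-- ===== CLAIM (what is proved, stated in full; the proofs are below) =====
def Claim_equal_parse_nmcli_output : Prop := ∀ (raw_output : String), Dom_parse_nmcli_output raw_output → Spec_parse_nmcli_output raw_output (parse_nmcli_output raw_output)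

-- ===== LEMMAS AND PROOFS =====

-- the per-line dict update shared (textually) by both ports
def pvStep (d : PySem.Dict String String) (line : String) : PySem.Dict String String :=
  if PySem.Str.isIn ":" line then
    let parts := (PySem.Str.splitMax? line ":" 1).getD []
    d.insert (PySem.Str.strip (parts.headD "")) (PySem.Str.strip ((parts.drop 1).headD ""))
  else d

-- A's loop step, on an already-stripped line
def pvGA (st : List (PySem.Dict String String) × PySem.Dict String String) (line : String) :
    List (PySem.Dict String String) × PySem.Dict String String :=
  if line = "" then
    if st.2.size ≠ 0 then
      (if st.2.get? "GENERAL.DEVICE" ≠ some "lo" then st.1 ++ [st.2] else st.1,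
       PySem.Dict.empty)
    else st
  else if PySem.Str.isIn ":" line then
    let parts := (PySem.Str.splitMax? line ":" 1).getD []
    (st.1, st.2.insert (PySem.Str.strip (parts.headD "")) (PySem.Str.strip ((parts.drop 1).headD "")))
  else st

-- B's partition step
def pvGB (st : List (List String) × List String) (line : String) :
    List (List String) × List String :=
  if line ≠ "" then (st.1, st.2 ++ [line]) else (st.1 ++ [st.2], [])

def pvP (d : PySem.Dict String String) : Bool :=
  d.size ≠ 0 ∧ d.get? "GENERAL.DEVICE" ≠ some "lo"

def pvFlush (st : List (PySem.Dict String String) × PySem.Dict String String) :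
    List (PySem.Dict String String) :=
  if st.2.size ≠ 0 then
    if st.2.get? "GENERAL.DEVICE" ≠ some "lo" then st.1 ++ [st.2] else st.1
  else st.1

def pvFinB (st : List (List String) × List String) : List (PySem.Dict String String) :=
  ((st.1 ++ [st.2]).map pvBuildBlock).filter pvP

lemma pvDict_size_zero {d : PySem.Dict String String} (h : d.size = 0) :
    d = PySem.Dict.empty := by
  apply PySem.Dict.ext
  have : d.items.length = 0 := h
  simpa [PySem.Dict.empty] using List.length_eq_zero_iff.mp this

lemma build_concat (blk : List String) (l : String) :
    pvBuildBlock (blk ++ [l]) = pvStep (pvBuildBlock blk) l := by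
  unfold pvBuildBlock
  rw [List.foldl_append]
  rfl

lemma gA_ne (st : List (PySem.Dict String String) × PySem.Dict String String)
    (l : String) (h : l ≠ "") : pvGA st l = (st.1, pvStep st.2 l) := by
  unfold pvGA pvStep
  rw [if_neg h]
  by_cases hc : PySem.Str.isIn ":" l = true
  · rw [if_pos hc, if_pos hc]
  · rw [if_neg hc, if_neg hc]

lemma gA_blank (st : List (PySem.Dict String String) × PySem.Dict String String) :
    pvGA st "" = (pvFlush st, PySem.Dict.empty) := by
  unfold pvGA pvFlush
  by_cases h : st.2.size = 0
  · simp [h, ← pvDict_size_zero h]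
  · simp [h]

lemma flush_pair (devs : List (PySem.Dict String String)) (d : PySem.Dict String String) :
    pvFlush (devs, d) = devs ++ [d].filter pvP := by
  unfold pvFlush pvP
  by_cases h1 : d.size = 0
  · simp [h1]
  · by_cases h2 : d.get? "GENERAL.DEVICE" = some "lo" <;> simp [h1, h2]

lemma gB_prefix (ls : List String) (bs : List (List String)) (cb : List String) :
    ls.foldl pvGB (bs, cb) =
      (bs ++ (ls.foldl pvGB ([], cb)).1, (ls.foldl pvGB ([], cb)).2) := by
  induction ls generalizing bs cb with
  | nil => simp
  | cons l ls ih =>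
    by_cases h : l = ""
    · subst h
      simp only [List.foldl_cons, pvGB]
      rw [if_neg (fun hc => hc rfl), if_neg (fun hc => hc rfl)]
      simp only [List.nil_append]
      rw [ih (bs ++ [cb]) [], ih [cb] []]
      simp
    · simp only [List.foldl_cons, pvGB, if_pos h]
      exact ih bs (cb ++ [l])

lemma pvMain (ls : List String) (devs : List (PySem.Dict String String)) (blk : List String) :
    pvFlush (ls.foldl pvGA (devs, pvBuildBlock blk)) =
      devs ++ pvFinB (ls.foldl pvGB ([], blk)) := by
  induction ls generalizing devs blk with
  | nil =>
    simp only [List.foldl_nil, pvFinB, List.nil_append, List.map_cons, List.map_nil]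
    exact flush_pair devs (pvBuildBlock blk)
  | cons l ls ih =>
    by_cases h : l = ""
    · subst h
      simp only [List.foldl_cons, gA_blank, pvGB]
      rw [if_neg (fun hc => hc rfl)]
      simp only [List.nil_append]
      have hflush : pvFlush (devs, pvBuildBlock blk) = devs ++ [pvBuildBlock blk].filter pvP :=
        flush_pair devs (pvBuildBlock blk)
      rw [show (PySem.Dict.empty : PySem.Dict String String) = pvBuildBlock [] from rfl,
          ih (pvFlush (devs, pvBuildBlock blk)) [], hflush,
          gB_prefix ls [blk] []]
      simp only [pvFinB, List.map_append, List.map_cons, List.map_nil, List.filter_append,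
        List.append_assoc, List.filter_cons, List.filter_nil]
    · simp only [List.foldl_cons, gA_ne _ l h, pvGB, if_pos h]
      rw [show (pvStep (pvBuildBlock blk) l) = pvBuildBlock (blk ++ [l]) from (build_concat blk l).symm]
      exact ih devs (blk ++ [l])

lemma A_char (raw : String) :
    parse_nmcli_output raw =
      (pvFlush (((PySem.Str.splitlines (PySem.Str.strip raw)).map PySem.Str.strip).foldl
        pvGA ([], PySem.Dict.empty))).map (·.items) := by
  unfold parse_nmcli_output pvFlush pvGA
  rw [List.foldl_map]

lemma B_char (raw : String) :
    parse_nmcli_output_alt raw =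
      (pvFinB (((PySem.Str.splitlines (PySem.Str.strip raw)).map PySem.Str.strip).foldl
        pvGB ([], []))).map (·.items) := rfl

-- ===== VERDICT (by name: the statement is the Claim_ definition above) =====
theorem parse_nmcli_output_spec : Claim_equal_parse_nmcli_output := by
  intro raw _
  unfold Spec_parse_nmcli_output
  rw [A_char, B_char]
  have := pvMain (((PySem.Str.splitlines (PySem.Str.strip raw)).map PySem.Str.strip)) [] []
  rw [show (PySem.Dict.empty : PySem.Dict String String) = pvBuildBlock [] from rfl, this]
  simp
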